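-- pv_equiv track=rewrite | github.com/NL2Code/CodeS | extract_sketch.py | extract_key_names
-- ===== SOURCE A (Python) =====
-- def extract_key_names(all_imports):
--     """
--     Extract key names from all imports.
--     """
--     key_names = []
--     for this_import in all_imports:
--         for item in this_import.split(" "):
--             if item == "import" or item == "from":
--                 continue
--             elif item == "as":
--                 break
--             else:
--                 if "." in item:
--                     for this_item in item.split("."):
--                         key_names.append(this_item)
--                 else:
--                     key_names.append(item)
--                 break
--
--     return key_names
-- ===== SOURCE B (Python) =====
-- def extract_key_names(all_imports):
--     """
--     Extract key names from all imports.
--     """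
--     key_names = []
--     for line in all_imports:
--         cur = ""
--         for ch in line + " ":
--             if ch != " ":
--                 cur += ch
--                 continue
--             if cur in ("import", "from"):
--                 cur = ""
--                 continue
--             if cur != "as":
--                 piece = ""
--                 for c in cur:
--                     if c == ".":
--                         key_names.append(piece)
--                         piece = ""
--                     else:
--                         piece += c
--                 key_names.append(piece)
--             break
--     return key_names
-- ===== Notes on version B (the rewrite author's own statement) =====
-- stated objective: alternative
-- what changed: Replaced A's split(' ') plus nested token loop (continue/break, dot-branch with split('.')) by a single character-level streaming scanner per line that builds the current token char by char and emits dot-separated pieces as it reads them, never calling split.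
import Mathlib
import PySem

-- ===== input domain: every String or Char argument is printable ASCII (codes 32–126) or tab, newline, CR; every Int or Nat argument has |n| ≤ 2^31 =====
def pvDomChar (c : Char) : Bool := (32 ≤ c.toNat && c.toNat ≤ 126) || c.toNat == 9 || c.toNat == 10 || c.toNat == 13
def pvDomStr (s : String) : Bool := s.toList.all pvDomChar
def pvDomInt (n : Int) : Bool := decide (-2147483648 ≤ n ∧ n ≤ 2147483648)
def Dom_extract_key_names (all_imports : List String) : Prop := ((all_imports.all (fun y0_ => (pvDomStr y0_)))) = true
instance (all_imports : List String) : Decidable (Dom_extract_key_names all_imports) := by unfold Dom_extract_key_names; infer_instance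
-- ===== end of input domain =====

-- B replaces A's split-then-nested-loop with a single character-level streaming scanner per line
-- (no split calls: it builds the current token char by char and emits dot-pieces as it reads them);
-- objective: alternative (same cost, genuinely different traversal).

-- ===== PORT A =====
-- Python's s.split(sep) for a non-empty literal sep (exact; PySem.Chars.splitOn is that function)
def pySplit (s sep : String) : List String :=
  (PySem.Chars.splitOn s.toList sep.toList).map String.ofList

-- inner 'for item in this_import.split(" ")' loop with continue/break
def ekInnerA : List String → List String
  | [] => []
  | item :: rest =>
    if item = "import" ∨ item = "from" then ekInnerA rest
    else if item = "as" then []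
    else if PySem.Str.isIn "." item then pySplit item "."
    else [item]

def extract_key_names (all_imports : List String) : List String :=
  all_imports.foldl (fun key_names this_import => key_names ++ ekInnerA (pySplit this_import " ")) []

-- ===== PORT B =====
-- the inner 'for c in cur' loop of B: emit dot-separated pieces of the token, char by char
def emitDots : List Char → List Char → List String
  | [], piece => [String.ofList piece]
  | c :: cs, piece => if c = '.' then String.ofList piece :: emitDots cs [] else emitDots cs (piece ++ [c])

-- the 'for ch in line + " "' loop of B: a streaming scanner over the characters
def scanB : List Char → List Char → List String
  | [], _cur => []
  | ch :: rest, cur =>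
    if ch ≠ ' ' then scanB rest (cur ++ [ch])
    else if cur = "import".toList ∨ cur = "from".toList then scanB rest []
    else if cur = "as".toList then []
    else emitDots cur []

def extract_key_names_alt (all_imports : List String) : List String :=
  all_imports.foldl (fun key_names line => key_names ++ scanB (line.toList ++ [' ']) []) []

-- ===== PRECONDITION & SPEC =====
def Spec_extract_key_names (all_imports : List String) (out : List String) : Prop := out = extract_key_names_alt all_imports
instance (all_imports : List String) (out : List String) : Decidable (Spec_extract_key_names all_imports out) := by unfold Spec_extract_key_names; infer_instance

-- ===== CLAIM (what is proved, stated in full; the proofs are below) =====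
def Claim_equal_extract_key_names : Prop := ∀ (all_imports : List String), Dom_extract_key_names all_imports → Spec_extract_key_names all_imports (extract_key_names all_imports)

-- ===== LEMMAS AND PROOFS =====

-- prepend a prefix to the first piece of a split (the "current partial token")
def consHead : List Char → List (List Char) → List (List Char)
  | p, [] => [p]
  | p, q :: qs => (p ++ q) :: qs

-- simple structural split of a char list at a separator char
def splitC (c : Char) : List Char → List (List Char)
  | [] => [[]]
  | x :: xs => if x = c then [] :: splitC c xs else consHead [x] (splitC c xs)

lemma splitC_ne_nil (c : Char) (l : List Char) : splitC c l ≠ [] := by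
  cases l with
  | nil => simp [splitC]
  | cons x xs =>
    simp only [splitC]
    split
    · simp
    · cases h : splitC c xs <;> simp [consHead]

lemma consHead_nil_left (r : List (List Char)) (h : r ≠ []) : consHead [] r = r := by
  cases r with
  | nil => exact absurd rfl h
  | cons q qs => simp [consHead]

lemma consHead_consHead (p q : List Char) (r : List (List Char)) :
    consHead p (consHead q r) = consHead (p ++ q) r := by
  cases r <;> simp [consHead]

-- PySem's fuel-based splitOn worker, characterised by splitC (single-char separator)
lemma splitOn_go_single (c : Char) (fuel : Nat) (l cur : List Char) (acc : List (List Char))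
    (hf : l.length < fuel) :
    PySem.Chars.splitOn.go [c] fuel l cur acc = acc.reverse ++ consHead cur.reverse (splitC c l) := by
  induction fuel generalizing l cur acc with
  | zero => omega
  | succ n ih =>
    cases l with
    | nil => simp [PySem.Chars.splitOn.go, splitC, consHead]
    | cons x xs =>
      by_cases hx : c = x
      · have hpre : List.isPrefixOf [c] (x :: xs) = true := by
          simp [List.isPrefixOf, hx]
        simp only [PySem.Chars.splitOn.go, hpre, if_pos, List.length_cons, List.length_nil,
          List.drop_succ_cons, List.drop_zero]
        rw [ih xs [] (cur.reverse :: acc) (by simpa using Nat.lt_of_succ_lt_succ hf)]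
        rw [splitC, if_pos hx.symm]
        simp [consHead]
        cases h : splitC c xs with
        | nil => exact absurd h (splitC_ne_nil c xs)
        | cons q qs => simp
      · have hpre : List.isPrefixOf [c] (x :: xs) = false := by
          simp [List.isPrefixOf]
          exact hx
        simp only [PySem.Chars.splitOn.go, hpre, Bool.false_eq_true, if_false]
        rw [ih xs (x :: cur) acc (by simpa using Nat.lt_of_succ_lt_succ hf)]
        rw [splitC, if_neg (fun e => hx e.symm)]
        rw [consHead_consHead]
        simp

lemma splitOn_single (c : Char) (l : List Char) :
    PySem.Chars.splitOn l [c] = splitC c l := by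
  unfold PySem.Chars.splitOn
  rw [splitOn_go_single c _ l [] [] (by omega)]
  simp [consHead_nil_left _ (splitC_ne_nil c l)]

-- B's dot-emitting loop equals mapping String.ofList over splitC '.'
lemma emitDots_eq (cs piece : List Char) :
    emitDots cs piece = (consHead piece (splitC '.' cs)).map String.ofList := by
  induction cs generalizing piece with
  | nil => simp [emitDots, splitC, consHead]
  | cons c cs ih =>
    by_cases hc : c = '.'
    · subst hc
      simp only [emitDots, splitC, ih]
      rw [consHead_nil_left _ (splitC_ne_nil '.' cs)]
      cases h : splitC '.' cs with
      | nil => exact absurd h (splitC_ne_nil '.' cs)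
      | cons q qs => simp [consHead]
    · simp only [emitDots, splitC, if_neg hc, ih]
      rw [consHead_consHead]

lemma ofList_eq_iff (l : List Char) (s : String) : String.ofList l = s ↔ l = s.toList := by
  constructor
  · intro h; rw [← h]; simp
  · intro h; rw [h]; simp

-- '.' ∉ cur → splitC '.' cur = [cur]
lemma splitC_no_sep (c : Char) (l : List Char) (h : c ∉ l) : splitC c l = [l] := by
  induction l with
  | nil => rfl
  | cons x xs ih =>
    rw [splitC, if_neg (fun e => h (by simp [← e]))]
    rw [ih (fun hm => h (List.mem_cons_of_mem _ hm))]
    simp [consHead]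

-- the leaf of the scanner (a meaningful token) equals the leaf of A's inner loop
lemma leaf_eq (cur : List Char) :
    emitDots cur [] =
      (if PySem.Str.isIn "." (String.ofList cur) then pySplit (String.ofList cur) "."
       else [String.ofList cur]) := by
  rw [emitDots_eq, consHead_nil_left _ (splitC_ne_nil '.' cur)]
  by_cases hd : PySem.Str.isIn "." (String.ofList cur)
  · rw [if_pos hd]
    unfold pySplit
    rw [show ("." : String).toList = ['.'] from rfl, splitOn_single]
    simp
  · rw [if_neg hd]
    have hmem : '.' ∉ cur := by
      intro hm
      obtain ⟨u, v, huv⟩ := List.mem_iff_append.mp hm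
      have : PySem.Str.isIn "." (String.ofList cur) = true := by
        rw [PySem.Str.isIn_iff_infix]
        refine ⟨u, v, ?_⟩
        simp [huv]
      exact hd this
    rw [splitC_no_sep _ _ hmem]
    simp

-- main invariant: the scanner over (l ++ [' ']) carrying partial token cur
-- equals A's inner loop over the space-split pieces with cur glued onto the first
lemma scan_eq (l cur : List Char) :
    scanB (l ++ [' ']) cur = ekInnerA ((consHead cur (splitC ' ' l)).map String.ofList) := by
  induction l generalizing cur with
  | nil =>
    simp only [List.nil_append, scanB, if_neg (by simp : ¬ (' ' ≠ ' '))]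
    rw [splitC]
    simp only [consHead, List.append_nil, List.map]
    by_cases h1 : cur = "import".toList ∨ cur = "from".toList
    · rw [if_pos h1]
      have : String.ofList cur = "import" ∨ String.ofList cur = "from" := by
        rcases h1 with h | h <;> [left; right] <;> rw [ofList_eq_iff] <;> exact h
      simp only [ekInnerA]
      rw [if_pos this]
    · rw [if_neg h1]
      have h1' : ¬ (String.ofList cur = "import" ∨ String.ofList cur = "from") := by
        intro h; apply h1
        rcases h with h | h <;> [left; right] <;> exact (ofList_eq_iff _ _).mp h
      by_cases h2 : cur = "as".toList
      · rw [if_pos h2]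
        have : String.ofList cur = "as" := (ofList_eq_iff _ _).mpr h2
        simp only [ekInnerA]
        rw [if_neg h1', if_pos this]
      · rw [if_neg h2]
        have h2' : ¬ String.ofList cur = "as" := fun h => h2 ((ofList_eq_iff _ _).mp h)
        simp only [ekInnerA]
        rw [if_neg h1', if_neg h2', leaf_eq cur]
  | cons x xs ih =>
    by_cases hx : x = ' '
    · subst hx
      simp only [List.cons_append, scanB, if_neg (by simp : ¬ (' ' ≠ ' '))]
      rw [splitC, if_pos rfl]
      simp only [consHead, List.append_nil, List.map]
      by_cases h1 : cur = "import".toList ∨ cur = "from".toList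
      · rw [if_pos h1]
        have : String.ofList cur = "import" ∨ String.ofList cur = "from" := by
          rcases h1 with h | h <;> [left; right] <;> rw [ofList_eq_iff] <;> exact h
        simp only [ekInnerA]
        rw [if_pos this, ih []]
        rw [consHead_nil_left _ (splitC_ne_nil ' ' xs)]
      · rw [if_neg h1]
        have h1' : ¬ (String.ofList cur = "import" ∨ String.ofList cur = "from") := by
          intro h; apply h1
          rcases h with h | h <;> [left; right] <;> exact (ofList_eq_iff _ _).mp h
        by_cases h2 : cur = "as".toList
        · rw [if_pos h2]
          have : String.ofList cur = "as" := (ofList_eq_iff _ _).mpr h2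
          simp only [ekInnerA]
          rw [if_neg h1', if_pos this]
        · rw [if_neg h2]
          have h2' : ¬ String.ofList cur = "as" := fun h => h2 ((ofList_eq_iff _ _).mp h)
          simp only [ekInnerA]
          rw [if_neg h1', if_neg h2', leaf_eq cur]
    · simp only [List.cons_append, scanB, if_pos hx]
      rw [ih (cur ++ [x])]
      rw [splitC, if_neg hx, consHead_consHead]

-- ===== VERDICT (by name: the statement is the Claim_ definition above) =====
theorem extract_key_names_spec : Claim_equal_extract_key_names := by
  intro all_imports _
  unfold Spec_extract_key_names extract_key_names extract_key_names_alt
  have hf : (fun (key_names : List String) (this_import : String) =>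
        key_names ++ ekInnerA (pySplit this_import " "))
      = fun key_names line => key_names ++ scanB (line.toList ++ [' ']) [] := by
    funext acc s
    rw [scan_eq s.toList []]
    unfold pySplit
    rw [show (" " : String).toList = [' '] from rfl, splitOn_single]
    rw [consHead_nil_left _ (splitC_ne_nil ' ' s.toList)]
  rw [hf]
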